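-- pv_equiv track=rewrite | github.com/lephe/stdoc | util.py | nest_paths_by_depth
-- ===== SOURCE A (Python) =====
-- from typing import Iterable, Any
--
-- def nest_paths(paths: Iterable[str]) -> dict[str, Any]:
--     def traverse(org, i, prefix, result):
--         while i < len(org) and org[i].startswith(prefix):
--             suffix = org[i][len(prefix):]
--             if "/" not in suffix:
--                 result[suffix] = org[i]
--                 i += 1
--             else:
--                 subdir = suffix[:suffix.index("/")+1]
--                 result[subdir] = dict()
--                 i = traverse(org, i, prefix + subdir, result[subdir])
--         return i
--
--     r: dict[str, Any] = dict()
--     traverse(paths, 0, "", r)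
--     return r
--
-- def nest_paths_by_depth(paths):
--     def aux(dic, depth):
--         for key, value in dic.items():
--             if key.endswith("/"):
--                 yield (depth, key, None)
--                 yield from aux(value, depth+1)
--             else:
--                 yield (depth, key, value)
--     yield from aux(nest_paths(paths), 0)
-- ===== SOURCE B (Python) =====
-- def nest_paths_by_depth(paths):
--     # Build the nested tree by pure recursion on contiguous runs (recursing on the run's
--     # sublist, returning fresh dicts), then emit entries depth-first with an explicit
--     # iterative stack instead of recursive generators.
--     org = list(paths)
--
--     def build(prefix, items):
--         d = {}
--         j = 0
--         while j < len(items):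
--             first = items[j]
--             suffix = first[len(prefix):]
--             cut = suffix.find("/")
--             if cut < 0:
--                 d[suffix] = first
--                 j += 1
--             else:
--                 key = suffix[:cut + 1]
--                 sub = prefix + key
--                 k = j
--                 while k < len(items) and items[k].startswith(sub):
--                     k += 1
--                 d[key] = build(sub, items[j:k])
--                 j = k
--         return d
--
--     root = build("", org)
--     stack = [[0, list(root.items()), 0]]
--     while stack:
--         frame = stack[-1]
--         if frame[2] == len(frame[1]):
--             stack.pop()
--             continue
--         key, value = frame[1][frame[2]]
--         frame[2] += 1
--         if key.endswith("/"):
--             yield (frame[0], key, None)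
--             stack.append([frame[0] + 1, list(value.items()), 0])
--         else:
--             yield (frame[0], key, value)
-- ===== Notes on version B (the rewrite author's own statement) =====
-- stated objective: alternative
-- what changed: The tree is built by pure recursion on contiguous list slices (an explicit run-counting scan, returning fresh dicts) instead of A's index-threading recursion that mutates a shared dict in place, and the entries are emitted with an explicit iterative stack instead of A's nested recursive generators.
import Mathlib
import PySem

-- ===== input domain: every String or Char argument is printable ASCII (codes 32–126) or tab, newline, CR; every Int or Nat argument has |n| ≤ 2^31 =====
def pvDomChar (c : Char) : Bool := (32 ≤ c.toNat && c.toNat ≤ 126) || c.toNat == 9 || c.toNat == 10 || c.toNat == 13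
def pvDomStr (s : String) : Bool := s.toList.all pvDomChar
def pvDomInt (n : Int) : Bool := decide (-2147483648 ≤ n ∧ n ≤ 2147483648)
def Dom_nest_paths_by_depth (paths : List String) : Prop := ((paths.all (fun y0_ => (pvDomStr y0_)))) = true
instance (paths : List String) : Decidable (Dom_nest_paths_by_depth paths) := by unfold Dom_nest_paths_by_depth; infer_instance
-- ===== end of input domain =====

-- B builds the tree by pure recursion on contiguous list slices and emits entries with an
-- explicit iterative stack, instead of A's index-threading recursion into a mutated shared
-- dict plus nested recursive generators (objective: alternative, same cost).

-- The nested dict[str, str | dict] value type, as an explicit mutual pair (strings as List Char).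
mutual
inductive PVal : Type
  | file : List Char → PVal
  | dir  : PDict → PVal
inductive PDict : Type
  | nil  : PDict
  | cons : List Char → PVal → PDict → PDict
end

-- Python dict assignment d[k] = v: overwrite keeps position, a new key appends at the end.
def pdInsert : PDict → List Char → PVal → PDict
  | .nil, k, v => .cons k v .nil
  | .cons k' v' t, k, v => if k' = k then .cons k' v t else .cons k' v' (pdInsert t k v)

-- totality guard for the unreachable branch where a "/" key holds a plain file value
-- (Python would crash on .items() there; never reached from nest_paths' output)
def asDict : PVal → PDict
  | .file _ => .nil
  | .dir d => d

-- tree size (used for auxA's termination and to seed the iterative DFS fuel, a guard only)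
mutual
def szV : PVal → Nat
  | .file _ => 0
  | .dir d => 1 + szD d
def szD : PDict → Nat
  | .nil => 0
  | .cons _ v t => 1 + szV v + szD t
end

-- ===== PORT A =====
-- traverse(org, i, prefix, result); the while loop and the recursion are fueled (guard only).
-- result[subdir] = dict(); i = traverse(...) is rendered value-style: the final inner dict is
-- inserted once (overwrite keeps the key's position, so the dict is identical).
def traverseA (fuel : Nat) (org : List (List Char)) (i : Nat) (pre : List Char)
    (result : PDict) : Nat × PDict :=
  match fuel with
  | 0 => (i, result)
  | f + 1 =>
    if h : i < org.length then
      let x := org[i]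
      if PySem.Chars.startswith x pre then
        let suffix := x.drop pre.length
        if PySem.Chars.isIn ['/'] suffix = false then
          traverseA f org (i + 1) pre (pdInsert result suffix (.file x))
        else
          let subdir := suffix.take ((PySem.Chars.find suffix ['/']).toNat + 1)
          let r2 := traverseA f org i (pre ++ subdir) .nil
          traverseA f org r2.1 pre (pdInsert result subdir (.dir r2.2))
      else (i, result)
    else (i, result)

-- aux(dic, depth) of A: recursive depth-first yield
def auxA : PDict → Int → List (Int × List Char × Option (List Char))
  | .nil, _ => []
  | .cons k v t, depth =>
    if PySem.Chars.endswith k ['/'] then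
      (depth, k, none) ::
        ((match v with
          | .dir d => auxA d (depth + 1)
          | .file _ => []) ++ auxA t depth)
    else
      (depth, k, (match v with | .file s => some s | .dir _ => none)) :: auxA t depth
termination_by d _ => szD d
decreasing_by all_goals (simp [szD, szV]; try omega)

def nest_paths_by_depth (paths : List String) : List (Int × String × Option String) :=
  let org := paths.map String.toList
  let fuel := org.length + (org.map List.length).sum + 1
  let r := (traverseA fuel org 0 [] .nil).2
  (auxA r 0).map (fun e => (e.1, String.ofList e.2.1, e.2.2.map String.ofList))

-- ===== PORT B =====
-- the inner "k = 0; while ...: k += 1" run-counting loop of Source B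
def countRun : List (List Char) → List Char → Nat
  | [], _ => 0
  | x :: t, sub => if PySem.Chars.startswith x sub then countRun t sub + 1 else 0

-- build(prefix, items): the j-indexed while loop is rendered as structural recursion on the
-- remaining sublist items[j:] (the same state); fuel is a totality guard only
def buildGo (fuel : Nat) (pre : List Char) (items : List (List Char)) (d : PDict) : PDict :=
  match fuel with
  | 0 => d
  | f + 1 =>
    match items with
    | [] => d
    | first :: rest =>
      let suffix := first.drop pre.length
      let cut := PySem.Chars.find suffix ['/']
      if cut < 0 then buildGo f pre rest (pdInsert d suffix (.file first))
      else
        let key := suffix.take (cut.toNat + 1)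
        let sub := pre ++ key
        let k := countRun (first :: rest) sub
        buildGo f pre ((first :: rest).drop k)
          (pdInsert d key (.dir (buildGo f sub ((first :: rest).take k) .nil)))


-- the iterative DFS loop: a frame [depth, entries, pos] is rendered as (depth, remaining
-- entries[pos:]); advancing pos consumes the head, pos == len(entries) is the .nil frame
def dfsGo (fuel : Nat) (stack : List (Int × PDict)) : List (Int × List Char × Option (List Char)) :=
  match fuel with
  | 0 => []
  | f + 1 =>
    match stack with
    | [] => []
    | (_, .nil) :: rest => dfsGo f rest
    | (depth, .cons k v t) :: rest =>
      if PySem.Chars.endswith k ['/'] then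
        (depth, k, none) :: dfsGo f ((depth + 1, asDict v) :: (depth, t) :: rest)
      else
        (depth, k, (match v with | .file s => some s | .dir _ => none)) :: dfsGo f ((depth, t) :: rest)

def nest_paths_by_depth_alt (paths : List String) : List (Int × String × Option String) :=
  let org := paths.map String.toList
  let fuel := org.length + (org.map List.length).sum + 1
  let root := buildGo fuel [] org .nil
  (dfsGo (2 * szD root + 1) [(0, root)]).map (fun e => (e.1, String.ofList e.2.1, e.2.2.map String.ofList))

-- ===== PRECONDITION & SPEC =====
def Spec_nest_paths_by_depth (paths : List String) (out : List (Int × String × Option String)) : Prop := out = nest_paths_by_depth_alt paths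
instance (paths : List String) (out : List (Int × String × Option String)) : Decidable (Spec_nest_paths_by_depth paths out) := by unfold Spec_nest_paths_by_depth; infer_instance

-- ===== CLAIM (what is proved, stated in full; the proofs are below) =====
def Claim_equal_nest_paths_by_depth : Prop := ∀ (paths : List String), Dom_nest_paths_by_depth paths → Spec_nest_paths_by_depth paths (nest_paths_by_depth paths)

-- ===== LEMMAS AND PROOFS =====

-- startswith via list prefixes
theorem sw_iff (x p : List Char) : PySem.Chars.startswith x p = true ↔ p <+: x :=
  PySem.Chars.startswith_iff x p

theorem sw_mono (x p q : List Char) (h : PySem.Chars.startswith x (p ++ q) = true) :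
    PySem.Chars.startswith x p = true := by
  rw [sw_iff] at h ⊢
  exact ((p.prefix_append q).trans h)

theorem sw_drop (x p : List Char) (h : PySem.Chars.startswith x p = true) :
    x = p ++ x.drop p.length := by
  rw [sw_iff] at h
  obtain ⟨t, rfl⟩ := h
  simp

-- countRun facts (the run-counting loop of B)
theorem countRun_le (l : List (List Char)) (sub : List Char) : countRun l sub ≤ l.length := by
  induction l with
  | nil => simp [countRun]
  | cons x t ih =>
    simp only [countRun]
    split
    · simp only [List.length_cons]
      omega
    · simp

theorem countRun_take (l : List (List Char)) (sub : List Char) :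
    ∀ x ∈ l.take (countRun l sub), PySem.Chars.startswith x sub = true := by
  induction l with
  | nil => simp
  | cons y t ih =>
    simp only [countRun]
    split
    · intro x hx
      rcases List.mem_cons.1 (by simpa using hx) with h | h
      · subst h; assumption
      · exact ih x h
    · simp

theorem countRun_stop (l : List (List Char)) (sub : List Char)
    (h : countRun l sub < l.length) :
    PySem.Chars.startswith (l[countRun l sub]'h) sub = false := by
  induction l with
  | nil => simp at h
  | cons y t ih =>
    revert h
    simp only [countRun]
    split
    · intro h
      simpa using ih (by simpa using h)
    · intro h
      simpa using (by simp_all : ¬ PySem.Chars.startswith y sub = true)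

theorem countRun_pos (y : List Char) (t : List (List Char)) (sub : List Char)
    (h : PySem.Chars.startswith y sub = true) : 1 ≤ countRun (y :: t) sub := by
  simp [countRun, h]

-- weight sum: one level deeper strictly decreases each element's remaining suffix
theorem sumsub (l : List (List Char)) (pl kl : Nat)
    (h : ∀ x ∈ l, pl + kl ≤ x.length) (hkl : 1 ≤ kl) :
    l.length + (l.map (fun x => x.length - (pl + kl))).sum ≤
      (l.map (fun x => x.length - pl)).sum := by
  induction l with
  | nil => simp
  | cons y t ih =>
    have hy := h y (List.mem_cons_self)
    have := ih (fun x hx => h x (List.mem_cons_of_mem _ hx))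
    simp only [List.map_cons, List.sum_cons, List.length_cons]
    omega

-- MAIN LEMMA 1: A's traverse agrees with B's run-based build
theorem trav_eq_build (fuel : Nat) :
    ∀ (org items : List (List Char)) (i : Nat) (pre : List Char) (d : PDict),
    org.drop i = items ++ org.drop (i + items.length) →
    (∀ x ∈ items, PySem.Chars.startswith x pre = true) →
    (∀ h : i + items.length < org.length,
      PySem.Chars.startswith (org[i + items.length]'h) pre = false) →
    items.length + (items.map (fun x => x.length - pre.length)).sum ≤ fuel →
    traverseA fuel org i pre d = (i + items.length, buildGo fuel pre items d) := by
  induction fuel with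
  | zero =>
    intro org items i pre d _ _ _ h4
    have : items = [] := by cases items with | nil => rfl | cons a t => simp at h4
    subst this
    simp [traverseA, buildGo]
  | succ f ih =>
    intro org items i pre d horg hall hstop hfuel
    cases items with
    | nil =>
      simp only [List.length_nil, Nat.add_zero] at hstop ⊢
      rw [traverseA]
      by_cases hi : i < org.length
      · have hsw := hstop hi
        simp [hi, hsw, buildGo]
      · simp [hi, buildGo]
    | cons first rest =>
      have hne : org.drop i ≠ [] := by rw [horg]; simp
      have hlen : i < org.length := by
        by_contra hx
        exact hne (List.drop_eq_nil_of_le (by omega))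
      have hget? : org[i]? = some first := by
        have h1 : (org.drop i).head? = some first := by rw [horg]; rfl
        rw [List.head?_drop] at h1; exact h1
      have hget : org[i] = first := by
        have := List.getElem?_eq_getElem hlen
        rw [this] at hget?; exact Option.some.inj hget?
      have hswf : PySem.Chars.startswith first pre = true := hall first List.mem_cons_self
      have hdrop1 : org.drop (i + 1) = rest ++ org.drop (i + (rest.length + 1)) := by
        have h1 := congrArg List.tail horg
        rw [List.tail_drop] at h1
        simpa using h1
      by_cases hin : PySem.Chars.isIn ['/'] (first.drop pre.length) = true
      · -- directory step
        have hinfix : ['/'] <:+: first.drop pre.length :=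
          (PySem.Chars.isIn_iff_infix _ _).1 hin
        have hfind0 : 0 ≤ PySem.Chars.find (first.drop pre.length) ['/'] :=
          (PySem.Chars.find_nonneg_iff _ _).2 hinfix
        have hsufne : first.drop pre.length ≠ [] := by
          intro e
          rw [e] at hinfix
          simp at hinfix
        set cut := (PySem.Chars.find (first.drop pre.length) ['/']).toNat with hcut
        set key := (first.drop pre.length).take (cut + 1) with hkey
        have hkeylen : 1 ≤ key.length := by
          rw [hkey, List.length_take]
          have : 1 ≤ (first.drop pre.length).length := List.length_pos_iff.2 hsufne
          omega
        have hsub_first : PySem.Chars.startswith first (pre ++ key) = true := by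
          rw [sw_iff]
          obtain ⟨q, hq⟩ := List.take_prefix (cut + 1) (first.drop pre.length)
          exact ⟨q, by rw [sw_drop first pre hswf, ← hq, hkey, List.append_assoc]⟩
        set k := countRun (first :: rest) (pre ++ key) with hk
        have hk1 : 1 ≤ k := countRun_pos _ _ _ hsub_first
        have hkle : k ≤ rest.length + 1 := by
          have := countRun_le (first :: rest) (pre ++ key)
          simpa using this
        have hlen_take : ((first :: rest).take k).length = k := by
          simp [List.length_take]
          omega
        have htake_sw := countRun_take (first :: rest) (pre ++ key)
        have hlen_elem : ∀ x ∈ (first :: rest).take k, pre.length + key.length ≤ x.length := by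
          intro x hx
          have h1 := htake_sw x hx
          rw [sw_iff] at h1
          have := h1.length_le
          simpa using this
        have hdropk : org.drop (i + k) = (first :: rest).drop k ++ org.drop (i + (rest.length + 1)) := by
          have h1 : org.drop (i + k) = (org.drop i).drop k := by
            rw [List.drop_drop]
          rw [h1, horg, List.drop_append_of_le_length (by simpa using hkle)]
          simp
        have horg_inner : org.drop i = (first :: rest).take k ++ org.drop (i + ((first :: rest).take k).length) := by
          rw [hlen_take, hdropk, ← List.append_assoc, List.take_append_drop]
          exact horg
        have hgl : ∀ h : k < rest.length + 1, org[i + k]? = some ((first :: rest)[k]'(by simpa using h)) := by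
          intro h
          have h1 : org[i + k]? = (org.drop i)[k]? := List.getElem?_drop.symm
          rw [horg, List.getElem?_append_left (by simpa using h)] at h1
          rw [h1]
          exact List.getElem?_eq_getElem (by simpa using h)
        have hstop_inner : ∀ h : i + ((first :: rest).take k).length < org.length,
            PySem.Chars.startswith (org[i + ((first :: rest).take k).length]'h) (pre ++ key) = false := by
          rw [hlen_take]
          intro h
          by_cases hck : k < rest.length + 1
          · have h1 := hgl hck
            have h2 : org[i + k]'h = (first :: rest)[k]'(by simpa using hck) := by
              have := List.getElem?_eq_getElem h
              rw [this] at h1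
              exact Option.some.inj h1
            rw [h2]
            exact countRun_stop (first :: rest) (pre ++ key) (by simpa using hck)
          · have hke : i + k = i + (rest.length + 1) := by omega
            simp only [List.length_cons] at hstop
            simp only [hke] at h ⊢
            cases hsw2 : PySem.Chars.startswith (org[i + (rest.length + 1)]'h) (pre ++ key)
            · rfl
            · exfalso
              have h3 := sw_mono _ _ _ hsw2
              have h4 := hstop h
              rw [h3] at h4
              exact Bool.true_eq_false.mp h4
        have hsplit : (((first :: rest)).map (fun x => x.length - pre.length)).sum =
            (((first :: rest).take k).map (fun x => x.length - pre.length)).sum +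
            (((first :: rest).drop k).map (fun x => x.length - pre.length)).sum := by
          conv_lhs => rw [← List.take_append_drop k (first :: rest)]
          simp
        have hss := sumsub ((first :: rest).take k) pre.length key.length hlen_elem hkeylen
        have hfuel_inner : ((first :: rest).take k).length +
            (((first :: rest).take k).map (fun x => x.length - (pre ++ key).length)).sum ≤ f := by
          rw [hlen_take]
          simp only [List.length_append]
          simp only [List.length_cons] at hfuel
          omega
        have hinner := ih org ((first :: rest).take k) i (pre ++ key) PDict.nil
          horg_inner htake_sw hstop_inner hfuel_inner
        have horg_out : org.drop (i + k) = (first :: rest).drop k ++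
            org.drop ((i + k) + ((first :: rest).drop k).length) := by
          rw [hdropk]
          have : i + k + ((first :: rest).drop k).length = i + (rest.length + 1) := by
            simp [List.length_drop]
            omega
          rw [this]
        have hall_out : ∀ x ∈ (first :: rest).drop k, PySem.Chars.startswith x pre = true :=
          fun x hx => hall x (List.mem_of_mem_drop hx)
        have hstop_out : ∀ h : (i + k) + ((first :: rest).drop k).length < org.length,
            PySem.Chars.startswith (org[(i + k) + ((first :: rest).drop k).length]'h) pre = false := by
          have hidx : (i + k) + ((first :: rest).drop k).length = i + (first :: rest).length := by
            simp [List.length_drop]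
            omega
          intro h
          simp only [hidx] at h ⊢
          exact hstop h
        have hfuel_out : ((first :: rest).drop k).length +
            (((first :: rest).drop k).map (fun x => x.length - pre.length)).sum ≤ f := by
          simp only [List.length_drop, List.length_cons] at *
          omega
        have houter := ih org ((first :: rest).drop k) (i + k) pre
          (pdInsert d key (.dir (buildGo f (pre ++ key) ((first :: rest).take k) PDict.nil)))
          horg_out hall_out hstop_out hfuel_out
        -- assemble both sides
        have hnotlt : ¬ (PySem.Chars.find (first.drop pre.length) ['/'] < 0) := by omega
        rw [hlen_take] at hinner
        rw [traverseA, buildGo]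
        simp only [hlen, dif_pos, hget, hswf, if_true, hin, Bool.true_eq_false, if_false,
          hnotlt, ← hcut, ← hkey, ← hk]
        rw [hinner]
        rw [houter]
        have : (i + k) + ((first :: rest).drop k).length = i + (first :: rest).length := by
          simp [List.length_drop]
          omega
        rw [this]
      · -- file step
        have hin' : PySem.Chars.isIn ['/'] (first.drop pre.length) = false :=
          Bool.not_eq_true _ |>.mp hin
        have hfind : PySem.Chars.find (first.drop pre.length) ['/'] = -1 :=
          (PySem.Chars.find_eq_neg_one_iff _ _).2 ((PySem.Chars.isIn_eq_false_iff _ _).1 hin')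
        have hstop1 : ∀ h : (i + 1) + rest.length < org.length,
            PySem.Chars.startswith (org[(i + 1) + rest.length]'h) pre = false := by
          have hidx : (i + 1) + rest.length = i + (first :: rest).length := by simp; omega
          intro h
          simp only [hidx] at h ⊢
          exact hstop h
        have hdrop1' : org.drop (i + 1) = rest ++ org.drop ((i + 1) + rest.length) := by
          rw [hdrop1]
          have : (i + 1) + rest.length = i + (rest.length + 1) := by omega
          rw [this]
        have hfuel1 : rest.length + (rest.map (fun x => x.length - pre.length)).sum ≤ f := by
          simp only [List.length_cons, List.map_cons, List.sum_cons] at hfuel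
          omega
        have hrec := ih org rest (i + 1) pre (pdInsert d (first.drop pre.length) (.file first))
          hdrop1' (fun x hx => hall x (List.mem_cons_of_mem _ hx)) hstop1 hfuel1
        rw [traverseA, buildGo]
        simp only [hlen, dif_pos, hget, hswf, if_true, hin', hfind]
        norm_num
        rw [hrec]
        have : (i + 1) + rest.length = i + (first :: rest).length := by simp; omega
        rw [this]
        simp

-- MAIN LEMMA 2: B's iterative stack DFS agrees with A's recursive aux
def stackCost (st : List (Int × PDict)) : Nat := (st.map (fun f => 2 * szD f.2 + 1)).sum

theorem szD_asDict (v : PVal) : szD (asDict v) ≤ szV v := by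
  cases v <;> simp [asDict, szD, szV]

theorem dfs_eq_aux (fuel : Nat) :
    ∀ st : List (Int × PDict), stackCost st ≤ fuel →
    dfsGo fuel st = (st.map (fun f => auxA f.2 f.1)).flatten := by
  induction fuel with
  | zero =>
    intro st h
    match st with
    | [] => simp [dfsGo]
    | f :: t => exfalso; simp [stackCost] at h
  | succ f ih =>
    intro st h
    match st with
    | [] => simp [dfsGo]
    | (dep, .nil) :: rest =>
      have hc : stackCost rest ≤ f := by (try simp [stackCost, szD] at h ⊢); (try omega)
      simp [dfsGo, ih rest hc, auxA]
    | (dep, .cons k v t) :: rest =>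
      have hsz := szD_asDict v
      have hc1 : stackCost ((dep + 1, asDict v) :: (dep, t) :: rest) ≤ f := by
        simp [stackCost, szD] at h ⊢; omega
      have hc2 : stackCost ((dep, t) :: rest) ≤ f := by
        simp [stackCost, szD] at h ⊢; omega
      by_cases he : PySem.Chars.endswith k ['/'] = true
      · simp only [List.map_cons, List.flatten_cons]
        rw [auxA.eq_def]
        cases v with
        | dir dd =>
          simp only [asDict] at hc1
          simp [dfsGo, he, asDict, ih _ hc1]
        | file s =>
          simp only [asDict] at hc1
          simp [dfsGo, he, asDict, auxA, ih _ hc1]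
      · simp only [List.map_cons, List.flatten_cons]
        rw [auxA.eq_def]
        cases v with
        | dir dd => simp [dfsGo, he, ih _ hc2]
        | file s => simp [dfsGo, he, ih _ hc2]

-- ===== VERDICT (by name: the statement is the Claim_ definition above) =====
theorem nest_paths_by_depth_spec : Claim_equal_nest_paths_by_depth := by
  intro paths _
  unfold Spec_nest_paths_by_depth nest_paths_by_depth nest_paths_by_depth_alt
  have h1 := trav_eq_build (((paths.map String.toList)).length + (((paths.map String.toList)).map List.length).sum + 1)
      (paths.map String.toList) (paths.map String.toList) 0 [] PDict.nil
    (by simp)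
    (by intro x _; rw [sw_iff]; exact List.nil_prefix)
    (by intro h; exact absurd h (by omega))
    (by simp)
  have h2 := dfs_eq_aux
      (2 * szD (buildGo (((paths.map String.toList)).length + (((paths.map String.toList)).map List.length).sum + 1) [] (paths.map String.toList) PDict.nil) + 1)
      [(0, buildGo (((paths.map String.toList)).length + (((paths.map String.toList)).map List.length).sum + 1) [] (paths.map String.toList) PDict.nil)]
    (by simp [stackCost])
  simp only [h1, h2]
  simp
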